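-- pv_equiv track=rewrite | github.com/NormPlum/freeCodeCamp_DailyCodingChallenges | 276.py | find_offender
-- ===== SOURCE A (Python) =====
-- def find_offender(arr):
--     for i in range(len(arr)):
--         arr2 = arr.copy()
--         arr2.pop(i)
--         arr3 = arr2.copy()
--         arr3.sort()
--         if arr2 == arr3:
--             return i
-- ===== SOURCE B (Python) =====
-- def find_offender(arr):
--     n = len(arr)
--     if n == 0:
--         return None
--     # advance to the first descent
--     j = 0
--     while j < n - 1 and arr[j] <= arr[j + 1]:
--         j += 1
--     if j == n - 1:
--         # whole array already sorted: removing index 0 keeps it sorted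
--         return 0
--     # only removing j or j+1 can help; each is an O(1)+suffix check
--     def sorted_from(s):
--         return all(arr[t] <= arr[t + 1] for t in range(s, n - 1))
--     if (j == 0 or arr[j - 1] <= arr[j + 1]) and sorted_from(j + 1):
--         return j
--     if (j + 2 >= n or arr[j] <= arr[j + 2]) and sorted_from(j + 2):
--         return j + 1
--     return None
-- ===== Notes on version B (the rewrite author's own statement) =====
-- stated objective: faster
-- what changed: Replaced the per-index copy+pop+sort check with a single pass: find the first descent, then only the two indices adjacent to it can fix the array, each verified by an O(1) boundary comparison plus one suffix scan.
import Mathlib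
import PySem

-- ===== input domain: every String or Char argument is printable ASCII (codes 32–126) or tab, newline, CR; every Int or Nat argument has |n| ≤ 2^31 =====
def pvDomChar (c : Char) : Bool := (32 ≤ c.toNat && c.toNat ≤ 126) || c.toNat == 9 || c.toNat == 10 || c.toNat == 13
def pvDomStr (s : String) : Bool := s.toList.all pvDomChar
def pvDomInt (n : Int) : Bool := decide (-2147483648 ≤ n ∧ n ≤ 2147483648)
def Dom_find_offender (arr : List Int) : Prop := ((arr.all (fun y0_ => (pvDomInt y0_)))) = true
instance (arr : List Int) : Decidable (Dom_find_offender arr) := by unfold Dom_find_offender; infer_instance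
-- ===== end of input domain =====

-- B replaces A's per-index copy+pop+sort scan by a single pass: locate the first descent;
-- only the two indices adjacent to it can mend the array (objective: faster).

-- ===== PORT A =====
-- 'for i in range(len(arr)): arr2 = arr.copy(); arr2.pop(i); if arr2 == sorted(arr2): return i'
def pvGoA (arr : List Int) : List Int → Option Int
  | [] => none
  | i :: rest =>
    match PySem.List.pop? arr i with
    | none => none   -- unreachable: every i produced by range(len(arr)) is in range (totality guard only)
    | some (_, arr2) =>
      if arr2 = PySem.List.sorted arr2 (fun x => x) false then some i else pvGoA arr rest

def find_offender (arr : List Int) : Option Int :=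
  pvGoA arr (PySem.List.pyRange 0 (arr.length : Int) 1)

-- ===== PORT B =====
-- the 'while j < n - 1 and arr[j] <= arr[j+1]: j += 1' loop (indices always in range, so getD is exact)
def pvClimb (arr : List Int) (j : Nat) : Nat :=
  if h : j < arr.length - 1 ∧ arr.getD j 0 ≤ arr.getD (j + 1) 0 then pvClimb arr (j + 1) else j
termination_by arr.length - 1 - j
decreasing_by omega

-- 'all(arr[t] <= arr[t+1] for t in range(s, n - 1))'
def pvSortedFrom (arr : List Int) (s : Nat) : Bool :=
  (List.range (arr.length - 1 - s)).all (fun k => decide (arr.getD (s + k) 0 ≤ arr.getD (s + k + 1) 0))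

def find_offender_alt (arr : List Int) : Option Int :=
  let n := arr.length
  if n = 0 then none
  else
    let j := pvClimb arr 0
    if j = n - 1 then some 0
    else if (j = 0 ∨ arr.getD (j - 1) 0 ≤ arr.getD (j + 1) 0) ∧ pvSortedFrom arr (j + 1) then
      some (j : Int)
    else if (n ≤ j + 2 ∨ arr.getD j 0 ≤ arr.getD (j + 2) 0) ∧ pvSortedFrom arr (j + 2) then
      some ((j : Int) + 1)
    else none

-- ===== PRECONDITION & SPEC =====
def Spec_find_offender (arr : List Int) (out : Option Int) : Prop := out = find_offender_alt arr
instance (arr : List Int) (out : Option Int) : Decidable (Spec_find_offender arr out) := by unfold Spec_find_offender; infer_instance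

-- ===== CLAIM (what is proved, stated in full; the proofs are below) =====
def Claim_equal_find_offender : Prop := ∀ (arr : List Int), Dom_find_offender arr → Spec_find_offender arr (find_offender arr)

-- ===== LEMMAS AND PROOFS =====

-- 'removing index i leaves a sorted list'
def pvP (arr : List Int) (i : Nat) : Prop := (arr.eraseIdx i).IsChain (· ≤ ·)

lemma pvEIdx_lt (arr : List Int) (i j : Nat) (hj : j < i) (h : j < (arr.eraseIdx i).length) :
    (arr.eraseIdx i)[j] = arr.getD j 0 := by
  rw [List.getElem_eraseIdx, dif_pos hj, List.getD_eq_getElem]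

lemma pvEIdx_ge (arr : List Int) (i j : Nat) (hj : i ≤ j) (h : j < (arr.eraseIdx i).length) :
    (arr.eraseIdx i)[j] = arr.getD (j + 1) 0 := by
  rw [List.getElem_eraseIdx, dif_neg (by omega), List.getD_eq_getElem]

lemma pvP_iff (arr : List Int) (i : Nat) (hi : i < arr.length) :
    pvP arr i ↔ (∀ k, k + 1 < i → arr.getD k 0 ≤ arr.getD (k + 1) 0) ∧
      (0 < i → i + 1 < arr.length → arr.getD (i - 1) 0 ≤ arr.getD (i + 1) 0) ∧
      (∀ k, i < k → k + 1 < arr.length → arr.getD k 0 ≤ arr.getD (k + 1) 0) := by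
  have hlen : (arr.eraseIdx i).length = arr.length - 1 := by
    rw [List.length_eraseIdx, if_pos hi]
  rw [pvP, List.isChain_iff_getElem]
  constructor
  · intro h
    refine ⟨fun k hk => ?_, fun h0 h1 => ?_, fun k hik hk => ?_⟩
    · have hm : k + 1 < (arr.eraseIdx i).length := by omega
      have := h k hm
      rwa [pvEIdx_lt arr i k (by omega), pvEIdx_lt arr i (k+1) (by omega)] at this
    · have hm : (i - 1) + 1 < (arr.eraseIdx i).length := by omega
      have := h (i - 1) hm
      rw [pvEIdx_lt arr i (i-1) (by omega), pvEIdx_ge arr i (i-1+1) (by omega)] at this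
      have e : i - 1 + 1 + 1 = i + 1 := by omega
      rwa [e] at this
    · have hm : (k - 1) + 1 < (arr.eraseIdx i).length := by omega
      have := h (k - 1) hm
      rw [pvEIdx_ge arr i (k-1) (by omega), pvEIdx_ge arr i (k-1+1) (by omega)] at this
      have e1 : k - 1 + 1 = k := by omega
      rwa [e1] at this
  · rintro ⟨h1, h2, h3⟩ m hm
    rcases lt_trichotomy (m + 1) i with hc | hc | hc
    · rw [pvEIdx_lt arr i m (by omega), pvEIdx_lt arr i (m+1) (by omega)]
      exact h1 m hc
    · rw [pvEIdx_lt arr i m (by omega), pvEIdx_ge arr i (m+1) (by omega)]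
      have e : m = i - 1 := by omega
      rw [e]
      have e2 : i - 1 + 1 + 1 = i + 1 := by omega
      rw [e2]
      exact h2 (by omega) (by omega)
    · rw [pvEIdx_ge arr i m (by omega), pvEIdx_ge arr i (m+1) (by omega)]
      exact h3 (m+1) (by omega) (by omega)

lemma pvCheck_iff (arr : List Int) (i : Nat) :
    (arr.eraseIdx i = PySem.List.sorted (arr.eraseIdx i) (fun x => x) false) ↔ pvP arr i := by
  rw [pvP, List.isChain_iff_pairwise]
  constructor
  · intro h
    have := PySem.List.sorted_pairwise (arr.eraseIdx i) (fun x => x)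
    rw [← h] at this
    simpa using this
  · intro h
    exact (PySem.List.sorted_eq_self_of_pairwise _ (fun x => x) (by simpa using h)).symm

lemma pvSortedFrom_iff (arr : List Int) (s : Nat) :
    pvSortedFrom arr s = true ↔
      ∀ k, s ≤ k → k + 1 < arr.length → arr.getD k 0 ≤ arr.getD (k + 1) 0 := by
  rw [pvSortedFrom, List.all_eq_true]
  constructor
  · intro h k hs hk
    have := h (k - s) (by rw [List.mem_range]; omega)
    have e : s + (k - s) = k := by omega
    rw [e] at this
    exact of_decide_eq_true this
  · intro h k hk
    rw [List.mem_range] at hk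
    exact decide_eq_true (h (s + k) (by omega) (by omega))

lemma pvClimb_spec (arr : List Int) : ∀ (fuel j : Nat), arr.length - 1 - j ≤ fuel →
    j ≤ arr.length - 1 →
    (∀ t, t < j → arr.getD t 0 ≤ arr.getD (t + 1) 0) →
    j ≤ pvClimb arr j ∧ pvClimb arr j ≤ arr.length - 1 ∧
      (∀ t, t < pvClimb arr j → arr.getD t 0 ≤ arr.getD (t + 1) 0) ∧
      (pvClimb arr j < arr.length - 1 →
        ¬ arr.getD (pvClimb arr j) 0 ≤ arr.getD (pvClimb arr j + 1) 0) := by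
  intro fuel
  induction fuel with
  | zero =>
    intro j hf hle hmono
    rw [pvClimb, dif_neg (by omega)]
    exact ⟨le_refl _, hle, hmono, fun h => absurd h (by omega)⟩
  | succ f ih =>
    intro j hf hle hmono
    rw [pvClimb]
    by_cases hc : j < arr.length - 1 ∧ arr.getD j 0 ≤ arr.getD (j + 1) 0
    · rw [dif_pos hc]
      have := ih (j + 1) (by omega) (by omega)
        (fun t ht => by rcases Nat.lt_succ_iff_lt_or_eq.mp ht with h | h
                        · exact hmono t h
                        · rw [h]; exact hc.2)
      exact ⟨by omega, this.2.1, this.2.2.1, this.2.2.2⟩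
    · rw [dif_neg hc]
      refine ⟨le_refl _, hle, hmono, fun h hle2 => hc ⟨h, hle2⟩⟩

lemma pvGoA_step_pos (arr : List Int) (i : Nat) (hi : i < arr.length) (h : pvP arr i) :
    pvGoA arr (PySem.List.pyRange (i : Int) (arr.length : Int) 1) = some (i : Int) := by
  rw [PySem.List.pyRange_one_cons (by exact_mod_cast hi), pvGoA,
    PySem.List.pop?_natCast arr i hi]
  dsimp only
  rw [if_pos ((pvCheck_iff arr i).mpr h)]

lemma pvGoA_step_neg (arr : List Int) (i : Nat) (hi : i < arr.length) (h : ¬ pvP arr i) :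
    pvGoA arr (PySem.List.pyRange (i : Int) (arr.length : Int) 1) =
      pvGoA arr (PySem.List.pyRange ((i : Int) + 1) (arr.length : Int) 1) := by
  rw [PySem.List.pyRange_one_cons (by exact_mod_cast hi), pvGoA,
    PySem.List.pop?_natCast arr i hi]
  dsimp only
  rw [if_neg (fun hc => h ((pvCheck_iff arr i).mp hc))]

lemma pvGoA_none (arr : List Int) : ∀ (fuel i : Nat), arr.length - i ≤ fuel →
    (∀ k, i ≤ k → k < arr.length → ¬ pvP arr k) →
    pvGoA arr (PySem.List.pyRange (i : Int) (arr.length : Int) 1) = none := by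
  intro fuel
  induction fuel with
  | zero =>
    intro i hf _
    rw [PySem.List.pyRange_one_eq_nil (by omega), pvGoA]
  | succ f ih =>
    intro i hf h
    by_cases hi : i < arr.length
    · rw [pvGoA_step_neg arr i hi (h i (le_refl _) hi)]
      have := ih (i + 1) (by omega) (fun k hk => h k (by omega))
      rw [← this]
      norm_cast
    · rw [PySem.List.pyRange_one_eq_nil (by exact_mod_cast Nat.le_of_not_lt hi), pvGoA]

lemma pvGoA_hit (arr : List Int) (m : Nat) (hm : m < arr.length) (hPm : pvP arr m) :
    ∀ (fuel i : Nat), m - i ≤ fuel → i ≤ m →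
    (∀ k, i ≤ k → k < m → ¬ pvP arr k) →
    pvGoA arr (PySem.List.pyRange (i : Int) (arr.length : Int) 1) = some (m : Int) := by
  intro fuel
  induction fuel with
  | zero =>
    intro i hf him _
    have : i = m := by omega
    subst this
    rw [pvGoA_step_pos arr i hm hPm]
  | succ f ih =>
    intro i hf him hmin
    by_cases he : i = m
    · subst he
      rw [pvGoA_step_pos arr i hm hPm]
    · rw [pvGoA_step_neg arr i (by omega) (hmin i (le_refl _) (by omega))]
      have := ih (i + 1) (by omega) (by omega) (fun k hk => hmin k (by omega))
      rw [← this]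
      norm_cast

-- ===== VERDICT (by name: the statement is the Claim_ definition above) =====
theorem find_offender_spec : Claim_equal_find_offender := by
  intro arr _
  unfold Spec_find_offender
  rw [find_offender]
  simp only [find_offender_alt]
  by_cases hn : arr.length = 0
  · rw [if_pos hn, PySem.List.pyRange_one_eq_nil (by simp [hn]), pvGoA]
  · rw [if_neg hn]
    obtain ⟨-, hjle, hmono, hdesc⟩ :=
      pvClimb_spec arr (arr.length - 1) 0 (by omega) (by omega) (fun t ht => absurd ht (by omega))
    set j := pvClimb arr 0 with hjdef
    by_cases hcase : j = arr.length - 1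
    · rw [if_pos hcase]
      have hP0 : pvP arr 0 := by
        rw [pvP_iff arr 0 (by omega)]
        exact ⟨fun k hk => absurd hk (by omega), fun h0 _ => absurd h0 (lt_irrefl 0),
          fun k _ hk1 => hmono k (by omega)⟩
      have := pvGoA_hit arr 0 (by omega) hP0 0 0 (by omega) (le_refl _)
        (fun k _ hk => absurd hk (by omega))
      simpa using this
    · rw [if_neg hcase]
      have hjlt : j < arr.length - 1 := by omega
      have hdesc' := hdesc hjlt
      have notP_lt : ∀ i, i < j → ¬ pvP arr i := fun i hij hP =>
        hdesc' (((pvP_iff arr i (by omega)).mp hP).2.2 j hij (by omega))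
      have notP_gt : ∀ i, j + 1 < i → i < arr.length → ¬ pvP arr i := fun i h1 _ hP =>
        hdesc' (((pvP_iff arr i (by omega)).mp hP).1 j (by omega))
      have PJ : pvP arr j ↔
          (j = 0 ∨ arr.getD (j - 1) 0 ≤ arr.getD (j + 1) 0) ∧ pvSortedFrom arr (j + 1) = true := by
        rw [pvP_iff arr j (by omega), pvSortedFrom_iff]
        constructor
        · rintro ⟨h1, h2, h3⟩
          refine ⟨?_, fun k hk hk1 => h3 k (by omega) hk1⟩
          by_cases hj0 : j = 0
          · exact Or.inl hj0
          · exact Or.inr (h2 (by omega) (by omega))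
        · rintro ⟨h2, h3⟩
          refine ⟨fun k hk => hmono k (by omega), fun h0 _ => ?_, fun k hk hk1 => h3 k (by omega) hk1⟩
          rcases h2 with h | h
          · exact absurd h (by omega)
          · exact h
      have PJ1 : pvP arr (j + 1) ↔
          (arr.length ≤ j + 2 ∨ arr.getD j 0 ≤ arr.getD (j + 2) 0) ∧
            pvSortedFrom arr (j + 2) = true := by
        rw [pvP_iff arr (j + 1) (by omega), pvSortedFrom_iff]
        constructor
        · rintro ⟨h1, h2, h3⟩
          refine ⟨?_, fun k hk hk1 => h3 k (by omega) hk1⟩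
          by_cases hc : arr.length ≤ j + 2
          · exact Or.inl hc
          · exact Or.inr (by simpa using h2 (by omega) (by omega))
        · rintro ⟨h2, h3⟩
          refine ⟨fun k hk => hmono k (by omega), fun _ hlt => ?_, fun k hk hk1 => h3 k (by omega) hk1⟩
          rcases h2 with h | h
          · exact absurd hlt (by omega)
          · simpa using h
      by_cases c1 : (j = 0 ∨ arr.getD (j - 1) 0 ≤ arr.getD (j + 1) 0) ∧ pvSortedFrom arr (j + 1) = true
      · rw [if_pos c1]
        exact pvGoA_hit arr j (by omega) (PJ.mpr c1) j 0 (by omega) (by omega)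
          (fun k _ hk => notP_lt k hk)
      · rw [if_neg c1]
        have hPJf : ¬ pvP arr j := fun hP => c1 (PJ.mp hP)
        by_cases c2 : (arr.length ≤ j + 2 ∨ arr.getD j 0 ≤ arr.getD (j + 2) 0) ∧
            pvSortedFrom arr (j + 2) = true
        · rw [if_pos c2]
          have := pvGoA_hit arr (j + 1) (by omega) (PJ1.mpr c2) (j + 1) 0 (by omega) (by omega)
            (fun k _ hk => by
              by_cases he : k = j
              · rw [he]; exact hPJf
              · exact notP_lt k (by omega))
          simpa using this
        · rw [if_neg c2]
          have hPJ1f : ¬ pvP arr (j + 1) := fun hP => c2 (PJ1.mp hP)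
          exact pvGoA_none arr arr.length 0 (by omega) (fun k _ hk => by
            rcases lt_trichotomy k j with h | h | h
            · exact notP_lt k h
            · rw [h]; exact hPJf
            · rcases Nat.lt_or_ge (j + 1) k with h2 | h2
              · exact notP_gt k h2 hk
              · have : k = j + 1 := by omega
                rw [this]; exact hPJ1f)
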